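-- pv_equiv track=rewrite | github.com/hissanova/okinawago_dictionary | kanahyouki.py | _get_mora
-- ===== SOURCE A (Python) =====
-- from typing import List, Tuple
--
-- vowels = {'a', 'i', 'u', 'e', 'o'}
--
-- conconants = {'C', 'S', 'Z', 'b', 'c', 'd', 'g', 'h', 'j', 'k', 'l', 'm', 'n', 'p', 'q', 'r', 's', 't', 'w', 'z'}
--
-- sokuon = {'Q'}
--
-- hatsuon = {'N'}
--
-- glottal_stops = { "'", '?'}
--
-- def _get_mora(mora:str, ch_list: List[str]) -> Tuple[str, List[str]]:
--     if len(ch_list) == 0: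
--         return mora, ch_list
--     if mora and mora[-1] in vowels and ch_list[0] in conconants.union(sokuon).union(hatsuon):
--         return mora, ch_list
--     ch = ch_list.pop(0)
--     if ch in glottal_stops:
--         if len(mora):
--             raise Exception("glottal_stop を表す音素がモーラの先頭以外に来ることはありません。")
--         mora = mora + ch
--         m, ch_list_ = _get_mora(mora, ch_list)
--     elif ch in conconants.union(vowels):
--         mora = mora + ch
--         m, ch_list_ = _get_mora(mora, ch_list)
--     elif ch in sokuon.union(hatsuon):
--         return mora + ch, ch_list
--     return m, ch_list_
-- ===== SOURCE B (Python) =====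
-- # B: single forward index scan that finds the cut point, then builds the result
-- # with one join and one slice; does NOT mutate ch_list (A pops from it in place;
-- # the equivalence proved is about the return value only).
-- vowels = {'a', 'i', 'u', 'e', 'o'}
-- conconants = {'C', 'S', 'Z', 'b', 'c', 'd', 'g', 'h', 'j', 'k', 'l', 'm', 'n', 'p', 'q', 'r', 's', 't', 'w', 'z'}
-- sokuon = {'Q'}
-- hatsuon = {'N'}
-- glottal_stops = {"'", '?'}
--
-- _stoppers = conconants | sokuon | hatsuon
-- _cv = conconants | vowels
--
-- def _get_mora(mora, ch_list):
--     prev_vowel = bool(mora) and mora[-1] in vowels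
--     for i, ch in enumerate(ch_list):
--         if prev_vowel and ch in _stoppers:
--             return mora + ''.join(ch_list[:i]), ch_list[i:]
--         if ch in sokuon or ch in hatsuon:
--             return mora + ''.join(ch_list[:i + 1]), ch_list[i + 1:]
--         if ch in glottal_stops:
--             if i > 0 or mora:
--                 raise Exception("glottal_stop を表す音素がモーラの先頭以外に来ることはありません。")
--         elif ch not in _cv:
--             raise ValueError("unknown phoneme: %r" % (ch,))
--         prev_vowel = ch in vowels
--     return mora + ''.join(ch_list), []
-- ===== Notes on version B (the rewrite author's own statement) =====
-- stated objective: simpler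
-- what changed: A recursively pops characters one at a time, rebuilding the mora by repeated string appends and re-testing the accumulated string's last character; B is a single non-mutating index scan that locates the cut point (tracking prev_vowel as a boolean) and then builds the result with one join and one slice.
import Mathlib
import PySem

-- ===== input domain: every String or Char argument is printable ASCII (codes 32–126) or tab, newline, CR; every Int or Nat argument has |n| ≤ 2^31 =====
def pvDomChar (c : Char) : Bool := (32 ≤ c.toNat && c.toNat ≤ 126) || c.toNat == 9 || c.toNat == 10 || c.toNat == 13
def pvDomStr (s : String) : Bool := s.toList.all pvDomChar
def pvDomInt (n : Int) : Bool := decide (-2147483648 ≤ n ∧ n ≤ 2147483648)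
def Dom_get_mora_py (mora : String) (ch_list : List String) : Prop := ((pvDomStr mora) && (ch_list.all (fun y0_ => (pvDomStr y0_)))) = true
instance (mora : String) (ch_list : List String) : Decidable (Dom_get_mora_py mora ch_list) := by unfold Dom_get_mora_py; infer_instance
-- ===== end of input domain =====

-- B replaces A's recursive consume-and-append with a single index scan that finds the
-- cut point and then builds the result with one join and one slice (simpler decomposition;
-- A pops from ch_list in place, B does not — the claim is about the return value only).

-- ===== PORT A =====
-- the module-level sets (sets of single-character strings)
def vowelsS : List String := ["a", "i", "u", "e", "o"]
def conconantsS : List String := ["C", "S", "Z", "b", "c", "d", "g", "h", "j", "k", "l", "m", "n", "p", "q", "r", "s", "t", "w", "z"]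
def sokuonS : List String := ["Q"]
def hatsuonS : List String := ["N"]
def glottalS : List String := ["'", "?"]
def vowelsC : List Char := ['a', 'i', 'u', 'e', 'o']

-- `bool(mora) and mora[-1] in vowels` (false on the empty string, as in Python)
def endsInVowel (s : String) : Bool := s.toList.getLast?.elim false (· ∈ vowelsC)

-- literal transliteration of A's recursion; on the two `raise` paths
-- (glottal stop after a nonempty mora; UnboundLocalError on an unknown
-- phoneme) the port returns ("", []) — those inputs are outside Pre_.
def get_mora_py : String → List String → String × List String
  | mora, [] => (mora, [])
  | mora, ch :: rest =>
    if endsInVowel mora && decide (ch ∈ conconantsS ++ sokuonS ++ hatsuonS) then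
      (mora, ch :: rest)
    else if ch ∈ glottalS then
      if mora.length > 0 then ("", [])  -- raise Exception(...)
      else get_mora_py (mora ++ ch) rest
    else if ch ∈ conconantsS ++ vowelsS then
      get_mora_py (mora ++ ch) rest
    else if ch ∈ sokuonS ++ hatsuonS then
      (mora ++ ch, rest)
    else ("", [])  -- falls through: UnboundLocalError on `m`

-- ===== PORT B =====
-- `''.join(l)`
def joinAll (l : List String) : String := l.foldl (· ++ ·) ""

-- the `for i, ch in enumerate(ch_list)` loop of B, scanning by index i
def bLoop (mora : String) (ch_list : List String) (prev_vowel : Bool) (i : Nat) :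
    String × List String :=
  if hlt : i < ch_list.length then
    if prev_vowel && decide (ch_list[i] ∈ conconantsS ++ sokuonS ++ hatsuonS) then
      (mora ++ joinAll (ch_list.take i), ch_list.drop i)
    else if ch_list[i] ∈ sokuonS ∨ ch_list[i] ∈ hatsuonS then
      (mora ++ joinAll (ch_list.take (i + 1)), ch_list.drop (i + 1))
    else if ch_list[i] ∈ glottalS then
      if 0 < i ∨ mora ≠ "" then ("", [])  -- raise Exception(...)
      else bLoop mora ch_list (decide (ch_list[i] ∈ vowelsS)) (i + 1)
    else if ch_list[i] ∉ conconantsS ++ vowelsS then ("", [])  -- raise ValueError(...)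
    else bLoop mora ch_list (decide (ch_list[i] ∈ vowelsS)) (i + 1)
  else (mora ++ joinAll ch_list, [])
termination_by ch_list.length - i
decreasing_by all_goals omega

def get_mora_py_alt (mora : String) (ch_list : List String) : String × List String :=
  bLoop mora ch_list (endsInVowel mora) 0

-- ===== PRECONDITION & SPEC =====
-- helpers describing A's scan locally (used only by Pre_, not by the ports):
-- does the mora accumulated just before position j end in a vowel?
def pvPrevV (mora : String) (ch_list : List String) (j : Nat) : Bool :=
  match j with
  | 0 => endsInVowel mora
  | k + 1 => (ch_list[k]?).elim false (· ∈ vowelsS)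
-- is position j consumed with the scan continuing past it?
def pvCross (mora : String) (ch_list : List String) (j : Nat) : Bool :=
  (ch_list[j]?).elim false (fun ch =>
    ch ∈ vowelsS || (ch ∈ conconantsS && !pvPrevV mora ch_list j)
      || (ch ∈ glottalS && j == 0 && mora == ""))
-- is position j a phoneme A can handle (no exception) when reached?
def pvOk (mora : String) (ch_list : List String) (j : Nat) : Bool :=
  (ch_list[j]?).elim true (fun ch =>
    ch ∈ vowelsS ++ conconantsS ++ sokuonS ++ hatsuonS
      || (ch ∈ glottalS && j == 0 && mora == ""))

-- Pre_ excludes exactly the inputs on which Python A raises: an unknown phoneme, or a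
-- glottal stop after a nonempty mora, reached before the scan's natural stop point.
def Pre_get_mora_py (mora : String) (ch_list : List String) : Prop :=
  ∀ i < ch_list.length,
    (∀ j < i, pvCross mora ch_list j = true) → pvOk mora ch_list i = true
instance (mora : String) (ch_list : List String) : Decidable (Pre_get_mora_py mora ch_list) := by
  unfold Pre_get_mora_py; infer_instance

def pvWitness_get_mora_py : String × List String := ("", ["'", "w", "a", "N", "k", "a"])

def Spec_get_mora_py (mora : String) (ch_list : List String) (out : String × List String) : Prop := out = get_mora_py_alt mora ch_list
instance (mora : String) (ch_list : List String) (out : String × List String) : Decidable (Spec_get_mora_py mora ch_list out) := by unfold Spec_get_mora_py; infer_instance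

-- ===== CLAIM (what is proved, stated in full; the proofs are below) =====
def Claim_equal_get_mora_py : Prop := ∀ (mora : String) (ch_list : List String), Dom_get_mora_py mora ch_list → Pre_get_mora_py mora ch_list → Spec_get_mora_py mora ch_list (get_mora_py mora ch_list)

-- ===== LEMMAS AND PROOFS =====
lemma joinAll_append_single (xs : List String) (s : String) :
    joinAll (xs ++ [s]) = joinAll xs ++ s := by
  simp [joinAll, List.foldl_append]

lemma endsInVowel_append (s t : String) (h : t.toList ≠ []) :
    endsInVowel (s ++ t) = endsInVowel t := by
  obtain ⟨c, hc⟩ : ∃ c, t.toList.getLast? = some c := by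
    cases hx : t.toList.getLast? with
    | none => exact absurd (List.getLast?_eq_none_iff.mp hx) h
    | some c => exact ⟨c, rfl⟩
  simp [endsInVowel, hc]

lemma append_ne_empty_right (s t : String) (h : t.toList ≠ []) : s ++ t ≠ "" := by
  intro hc
  apply h
  have h2 := congrArg String.toList hc
  simp at h2
  have : t = "" := h2.2
  rw [this]; rfl

lemma append_empty_right (s : String) : s ++ "" = s := by
  apply String.ext; simp

lemma ne_empty_length_pos (s : String) (h : s ≠ "") : s.length > 0 := by
  cases hx : s.toList with
  | nil => exact absurd (String.ext (by simp [hx])) h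
  | cons c cs =>
    rw [← String.length_toList, hx]; simp

-- facts about the finite phoneme sets, checked by computation
lemma mem_qn_props : ∀ s, s ∈ sokuonS ++ hatsuonS →
    s ∉ glottalS ∧ s ∉ conconantsS ++ vowelsS := by decide
lemma mem_g_props : ∀ s, s ∈ glottalS →
    s.toList ≠ [] ∧ endsInVowel s = decide (s ∈ vowelsS) := by decide
lemma mem_cv_props : ∀ s, s ∈ conconantsS ++ vowelsS →
    s.toList ≠ [] ∧ endsInVowel s = decide (s ∈ vowelsS) := by decide

-- the core invariant: A at state (mora0 ++ join(take i), drop i) equals B's loop at index i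
theorem key (L0 : List String) (i : Nat) (mora0 : String)
    (H : i ≠ 0 → mora0 ++ joinAll (L0.take i) ≠ "") :
    get_mora_py (mora0 ++ joinAll (L0.take i)) (L0.drop i)
      = bLoop mora0 L0 (endsInVowel (mora0 ++ joinAll (L0.take i))) i := by
  rw [bLoop]
  by_cases hlen : i < L0.length
  · rw [dif_pos hlen]
    have hdrop : L0.drop i = L0[i] :: L0.drop (i + 1) := List.drop_eq_getElem_cons hlen
    have htake : L0.take (i + 1) = L0.take i ++ [L0[i]] := by
      rw [List.take_add_one, List.getElem?_eq_getElem hlen]; rfl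
    have hMch : mora0 ++ joinAll (L0.take (i + 1))
        = (mora0 ++ joinAll (L0.take i)) ++ L0[i] := by
      rw [htake, joinAll_append_single, String.append_assoc]
    rw [hdrop, get_mora_py]
    by_cases hguard : (endsInVowel (mora0 ++ joinAll (L0.take i))
        && decide (L0[i] ∈ conconantsS ++ sokuonS ++ hatsuonS)) = true
    · rw [if_pos hguard, if_pos hguard, ← hdrop]
    · rw [if_neg hguard, if_neg hguard]
      by_cases hqn : L0[i] ∈ sokuonS ∨ L0[i] ∈ hatsuonS
      · -- sokuon/hatsuon: consume it and return
        have hsh : L0[i] ∈ sokuonS ++ hatsuonS := List.mem_append.mpr hqn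
        obtain ⟨hg, hcv⟩ := mem_qn_props _ hsh
        rw [if_pos hqn, if_neg hg, if_neg hcv, if_pos hsh, hMch]
      · rw [if_neg hqn]
        by_cases hg : L0[i] ∈ glottalS
        · -- glottal stop
          obtain ⟨hne, hev1⟩ := mem_g_props _ hg
          rw [if_pos hg, if_pos hg]
          by_cases hraise : 0 < i ∨ mora0 ≠ ""
          · -- both raise
            have hMne : mora0 ++ joinAll (L0.take i) ≠ "" := by
              rcases hraise with h0 | h0
              · exact H (by omega)
              · intro hc
                have h2 := congrArg String.toList hc
                simp at h2
                exact h0 (String.ext (by simp [h2.1]))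
            rw [if_pos (ne_empty_length_pos _ hMne), if_pos hraise]
          · -- i = 0 and mora0 = "": the glottal stop is consumed, scan continues
            have hi0 : i = 0 := by omega
            have hm0 : mora0 = "" := by by_contra h; exact hraise (Or.inr h)
            have hM0 : mora0 ++ joinAll (L0.take i) = "" := by
              subst hi0 hm0; rfl
            rw [if_neg (by rw [hM0]; decide), if_neg hraise]
            have hrec := key L0 (i + 1) mora0 (by
              intro _; rw [hMch]; exact append_ne_empty_right _ _ hne)
            rw [hMch, endsInVowel_append _ _ hne, hev1] at hrec
            exact hrec
        · rw [if_neg hg, if_neg hg]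
          by_cases hcv : L0[i] ∈ conconantsS ++ vowelsS
          · -- consonant or vowel: consume it and continue
            obtain ⟨hne, hev1⟩ := mem_cv_props _ hcv
            rw [if_pos hcv, if_neg (not_not_intro hcv)]
            have hrec := key L0 (i + 1) mora0 (by
              intro _; rw [hMch]; exact append_ne_empty_right _ _ hne)
            rw [hMch, endsInVowel_append _ _ hne, hev1] at hrec
            exact hrec
          · -- unknown phoneme: both raise
            have hsh : L0[i] ∉ sokuonS ++ hatsuonS := by
              rw [List.mem_append]; exact hqn
            rw [if_neg hcv, if_neg hsh, if_pos hcv]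
  · rw [dif_neg hlen]
    have hdrop : L0.drop i = [] := List.drop_eq_nil_of_le (by omega)
    have htake : L0.take i = L0 := List.take_of_length_le (by omega)
    rw [hdrop, htake, get_mora_py]
termination_by L0.length - i
decreasing_by all_goals omega

-- ===== VERDICT (by name: the statement is the Claim_ definition above) =====
theorem get_mora_py_spec : Claim_equal_get_mora_py := by
  intro mora ch_list _ _
  unfold Spec_get_mora_py get_mora_py_alt
  have h := key ch_list 0 mora (by intro h; exact absurd rfl h)
  rw [show ch_list.take 0 = [] from rfl] at h
  rw [show joinAll [] = "" from rfl] at h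
  rw [append_empty_right] at h
  rw [show ch_list.drop 0 = ch_list from rfl] at h
  exact h
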